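-- pv_equiv track=rewrite | github.com/bishnu1710/legal-ai-agent | utils/helpers.py | limit_clauses
-- ===== SOURCE A (Python) =====
-- def limit_clauses(clauses, max_chars=4000, max_clauses=20):
--     selected = []
--     total = 0
--
--     for c in clauses[:max_clauses]:
--         if total + len(c) > max_chars:
--             break
--         selected.append(c)
--         total += len(c)
--
--     return selected
-- ===== SOURCE B (Python) =====
-- def limit_clauses(clauses, max_chars=4000, max_clauses=20):
--     pre = clauses[:max_clauses]
--     totals = []
--     run = 0
--     for c in pre:
--         run += len(c)
--         totals.append(run)
--     cut = next((i for i, t in enumerate(totals) if t > max_chars), len(pre))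
--     return pre[:cut]
-- ===== Notes on version B (the rewrite author's own statement) =====
-- stated objective: alternative
-- what changed: B first builds the full prefix-sum table of clause lengths over clauses[:max_clauses], then finds the first index whose running total exceeds max_chars and returns the slice up to it, instead of A's single loop with an inline running total and break.
import Mathlib
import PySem

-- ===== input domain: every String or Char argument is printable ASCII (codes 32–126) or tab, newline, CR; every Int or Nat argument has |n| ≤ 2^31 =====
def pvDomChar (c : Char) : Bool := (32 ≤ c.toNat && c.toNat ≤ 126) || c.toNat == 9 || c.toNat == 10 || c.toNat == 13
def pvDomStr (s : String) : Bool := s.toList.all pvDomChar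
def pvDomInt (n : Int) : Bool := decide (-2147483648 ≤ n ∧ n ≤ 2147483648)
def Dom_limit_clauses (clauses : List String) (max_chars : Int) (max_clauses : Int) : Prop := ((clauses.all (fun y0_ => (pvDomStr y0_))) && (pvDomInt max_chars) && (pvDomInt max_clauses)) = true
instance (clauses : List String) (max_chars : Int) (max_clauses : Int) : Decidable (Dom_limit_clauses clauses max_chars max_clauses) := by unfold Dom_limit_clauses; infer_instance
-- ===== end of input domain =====

-- B replaces A's single running-total loop with a break by a two-phase prefix-sum table + first-overflow index + slice (alternative decomposition, same cost).


-- ===== PORT A =====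
-- A's loop: running total, append until total + len(c) > max_chars, then break.
def lcLoopA (max_chars : Int) : List String → List String → Int → List String
  | [], sel, _ => sel
  | c :: rest, sel, total =>
    if total + PySem.Str.len c > max_chars then sel
    else lcLoopA max_chars rest (sel ++ [c]) (total + PySem.Str.len c)

def limit_clauses (clauses : List String) (max_chars : Int) (max_clauses : Int) : List String :=
  lcLoopA max_chars (PySem.List.slice clauses none (some max_clauses)) [] 0

-- ===== PORT B =====
-- prefix-sum table of lengths, threaded running value
def lcPrefix : List String → Int → List Int
  | [], _ => []
  | c :: rest, run => (run + PySem.Str.len c) :: lcPrefix rest (run + PySem.Str.len c)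

def limit_clauses_alt (clauses : List String) (max_chars : Int) (max_clauses : Int) : List String :=
  let pre := PySem.List.slice clauses none (some max_clauses)
  let totals := lcPrefix pre 0
  let cut := totals.findIdx (fun t => max_chars < t)
  pre.take cut

-- ===== PRECONDITION & SPEC =====
def Spec_limit_clauses (clauses : List String) (max_chars : Int) (max_clauses : Int) (out : List String) : Prop := out = limit_clauses_alt clauses max_chars max_clauses
instance (clauses : List String) (max_chars : Int) (max_clauses : Int) (out : List String) : Decidable (Spec_limit_clauses clauses max_chars max_clauses out) := by unfold Spec_limit_clauses; infer_instance

-- ===== CLAIM (what is proved, stated in full; the proofs are below) =====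
def Claim_equal_limit_clauses : Prop := ∀ (clauses : List String) (max_chars : Int) (max_clauses : Int), Dom_limit_clauses clauses max_chars max_clauses → Spec_limit_clauses clauses max_chars max_clauses (limit_clauses clauses max_chars max_clauses)

-- ===== LEMMAS AND PROOFS =====
theorem lcLoopA_eq_take_findIdx (max_chars : Int) :
    ∀ (l : List String) (total : Int) (sel : List String),
      lcLoopA max_chars l sel total =
        sel ++ l.take ((lcPrefix l total).findIdx (fun t => max_chars < t)) := by
  intro l
  induction l with
  | nil => intro total sel; simp [lcLoopA, lcPrefix]
  | cons c rest ih =>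
    intro total sel
    by_cases h : max_chars < total + (c.length : Int)
    · simp [lcLoopA, lcPrefix, List.findIdx_cons, PySem.Str.len, h]
    · simp [lcLoopA, lcPrefix, List.findIdx_cons, PySem.Str.len, h, ih]

-- ===== VERDICT (by name: the statement is the Claim_ definition above) =====
theorem limit_clauses_spec : Claim_equal_limit_clauses := by
  intro clauses max_chars max_clauses _
  unfold Spec_limit_clauses limit_clauses limit_clauses_alt
  simpa using lcLoopA_eq_take_findIdx max_chars (PySem.List.slice clauses none (some max_clauses)) 0 []
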